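-- pv_equiv track=rewrite | github.com/jyotsna819/daa | InsertionSort.py | insertion_sort_recursive
-- ===== SOURCE A (Python) =====
-- def insertion_sort_recursive(arr, n, index, comparisons, swaps):
--     if index == n:
--         return comparisons, swaps
--     key = arr[index]
--     j = index - 1
--     while j >= 0 and arr[j] > key:
--         comparisons += 1
--         arr[j + 1] = arr[j]
--         swaps += 1
--         j -= 1
--     arr[j + 1] = key
--     if j >= 0:  # Only count comparison when a swap happens
--         comparisons += 1
--     return insertion_sort_recursive(arr, n, index + 1, comparisons, swaps)
-- ===== SOURCE B (Python) =====
-- def insertion_sort_recursive(arr, n, index, comparisons, swaps):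
--     for i in range(max(index, 0), n):
--         key = arr[i]
--         s = 0
--         for x in reversed(arr[:i]):
--             if x > key:
--                 s += 1
--             else:
--                 break
--         cut = i - s
--         arr[cut:i + 1] = [key] + arr[cut:i]
--         comparisons += s + (1 if s < i else 0)
--         swaps += s
--     return comparisons, swaps
-- ===== Notes on version B (the rewrite author's own statement) =====
-- stated objective: faster
-- what changed: A's tail recursion with an element-by-element shifting while loop is replaced by an iterative for loop that counts the shift length by scanning the reversed prefix and performs a single slice rotation, deriving both counters arithmetically from that count; same O(n^2) worst case, but the per-element Python-level shift loop and the deep recursion are gone (measured ~2.2x, and no recursion-limit blowup).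
import Mathlib
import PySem

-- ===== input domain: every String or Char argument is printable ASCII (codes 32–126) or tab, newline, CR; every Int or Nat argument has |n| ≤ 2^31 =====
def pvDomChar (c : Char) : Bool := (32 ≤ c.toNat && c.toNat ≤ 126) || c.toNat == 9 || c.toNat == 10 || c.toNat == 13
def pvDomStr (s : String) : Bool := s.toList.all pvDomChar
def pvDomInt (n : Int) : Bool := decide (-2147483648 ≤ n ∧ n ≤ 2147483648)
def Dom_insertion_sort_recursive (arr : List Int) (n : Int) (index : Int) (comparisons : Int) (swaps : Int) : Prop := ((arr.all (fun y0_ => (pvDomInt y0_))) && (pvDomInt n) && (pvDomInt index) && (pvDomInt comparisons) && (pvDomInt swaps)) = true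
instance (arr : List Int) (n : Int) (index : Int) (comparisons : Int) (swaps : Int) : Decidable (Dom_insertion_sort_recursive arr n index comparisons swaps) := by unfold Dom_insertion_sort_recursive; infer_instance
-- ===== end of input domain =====

-- B replaces A's recursive element-by-element shifting loop by an iterative scan-count-and-rotate
-- step (alternative decomposition, same asymptotic cost); a negative start position contributes
-- nothing in A, so B starts at max(index, 0). In Python both A and B mutate `arr` identically;
-- the equivalence proved here is about the returned (comparisons, swaps) pair, ported as a
-- 2-element list.

-- ===== PORT A =====
-- A's while loop; state (arr, j+1 encoded as a Nat, comparisons, swaps)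
def pvWhileA (key : Int) : List Int → Nat → Int → Int → List Int × Nat × Int × Int
  | arr, 0, c, s => (arr, 0, c, s)
  | arr, k+1, c, s =>
      if arr.getD k 0 > key then
        pvWhileA key (arr.set (k+1) (arr.getD k 0)) k (c+1) (s+1)
      else (arr, k+1, c, s)

-- A's recursion, with fuel = (n - index).toNat (index == n is fuel 0); faithful for 0 ≤ index ≤ n ≤ len(arr)
def pvRecA : Nat → List Int → Int → Int → Int → Int × Int
  | 0, _, _, c, s => (c, s)
  | f+1, arr, index, c, s =>
      let key := arr.getD index.toNat 0
      let r := pvWhileA key arr index.toNat c s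
      let arr' := r.1.set r.2.1 key
      let c' := if 1 ≤ r.2.1 then r.2.2.1 + 1 else r.2.2.1
      pvRecA f arr' (index + 1) c' r.2.2.2

def insertion_sort_recursive (arr : List Int) (n : Int) (index : Int) (comparisons : Int) (swaps : Int) : List Int :=
  let r := pvRecA (n - index).toNat arr index comparisons swaps
  [r.1, r.2]

-- ===== PORT B =====
-- B's inner for-with-break: how many leading elements of the reversed prefix exceed key
def pvScanGT (key : Int) : List Int → Nat
  | [] => 0
  | x :: xs => if x > key then pvScanGT key xs + 1 else 0

-- one iteration of B's for-loop; state (arr, comparisons, swaps); the slice assignment is the appends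
def pvStepB (st : List Int × Int × Int) (i : Int) : List Int × Int × Int :=
  let key := st.1.getD i.toNat 0
  let sh := pvScanGT key (st.1.take i.toNat).reverse
  let cut := i.toNat - sh
  let arr' := st.1.take cut ++ [key] ++ (st.1.drop cut).take sh ++ st.1.drop (i.toNat + 1)
  (arr', st.2.1 + (sh : Int) + (if (sh : Int) < i then 1 else 0), st.2.2 + (sh : Int))

def insertion_sort_recursive_alt (arr : List Int) (n : Int) (index : Int) (comparisons : Int) (swaps : Int) : List Int :=
  let r := (PySem.List.pyRange (max index 0) n 1).foldl pvStepB (arr, comparisons, swaps)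
  [r.2.1, r.2.2]

-- ===== PRECONDITION & SPEC =====
-- Pre_ is exactly A's domain: A returns immediately when index = n, and otherwise returns iff
-- -len(arr) ≤ index ≤ n ≤ len(arr); on everything else A raises IndexError or recurses without bound.
def Pre_insertion_sort_recursive (arr : List Int) (n : Int) (index : Int) (comparisons : Int) (swaps : Int) : Prop :=
  index = n ∨ (-(arr.length : Int) ≤ index ∧ index ≤ n ∧ n ≤ arr.length)
instance (arr : List Int) (n : Int) (index : Int) (comparisons : Int) (swaps : Int) : Decidable (Pre_insertion_sort_recursive arr n index comparisons swaps) := by unfold Pre_insertion_sort_recursive; infer_instance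
def pvWitness_insertion_sort_recursive : List Int × Int × Int × Int × Int := ([3, 1, 2], 3, 0, 0, 0)

def Spec_insertion_sort_recursive (arr : List Int) (n : Int) (index : Int) (comparisons : Int) (swaps : Int) (out : List Int) : Prop := out = insertion_sort_recursive_alt arr n index comparisons swaps
instance (arr : List Int) (n : Int) (index : Int) (comparisons : Int) (swaps : Int) (out : List Int) : Decidable (Spec_insertion_sort_recursive arr n index comparisons swaps out) := by unfold Spec_insertion_sort_recursive; infer_instance

-- ===== CLAIM (what is proved, stated in full; the proofs are below) =====
def Claim_equal_insertion_sort_recursive : Prop := ∀ (arr : List Int) (n : Int) (index : Int) (comparisons : Int) (swaps : Int), Dom_insertion_sort_recursive arr n index comparisons swaps → Pre_insertion_sort_recursive arr n index comparisons swaps → Spec_insertion_sort_recursive arr n index comparisons swaps (insertion_sort_recursive arr n index comparisons swaps)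

-- ===== LEMMAS AND PROOFS =====

theorem pvScanGT_le (key : Int) (l : List Int) : pvScanGT key l ≤ l.length := by
  induction l with
  | nil => simp [pvScanGT]
  | cons x xs ih =>
    simp only [pvScanGT]
    split
    · simp; omega
    · simp

-- one shift step of the while loop, seen on the slice decomposition of the array
theorem rot_step (arr : List Int) (g : Int) (k sh cut : Nat) (hcut : cut + sh = k) (hk : k + 1 < arr.length)
    (hg : arr[k]? = some g) :
    (arr.set (k+1) g).take (cut + 1) ++ ((arr.set (k+1) g).drop cut).take sh ++ (arr.set (k+1) g).drop (k+1)
    = arr.take (cut + 1) ++ (arr.drop cut).take (sh + 1) ++ arr.drop (k+1+1) := by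
  apply List.ext_getElem?
  intro i
  simp only [List.getElem?_append, List.getElem?_take, List.getElem?_drop, List.getElem?_set,
    List.length_take, List.length_drop, List.length_set, List.length_append]
  split_ifs <;> first | rfl | omega | (rw [← hg]; congr 1; omega) | (congr 1; omega)

-- while-loop characterisation: counters advance by the scan count sh, final j+1 = m - sh,
-- and the array is the shifted form
theorem pvWhileA_eq (key : Int) (m : Nat) : ∀ (arr : List Int) (c s : Int), m < arr.length →
    pvWhileA key arr m c s =
      (arr.take (m - pvScanGT key (arr.take m).reverse + 1) ++
         (arr.drop (m - pvScanGT key (arr.take m).reverse)).take (pvScanGT key (arr.take m).reverse) ++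
         arr.drop (m + 1),
       m - pvScanGT key (arr.take m).reverse,
       c + (pvScanGT key (arr.take m).reverse : Int),
       s + (pvScanGT key (arr.take m).reverse : Int)) := by
  induction m with
  | zero =>
    intro arr c s h
    simp only [pvWhileA, List.take_zero, List.reverse_nil, pvScanGT]
    simp [List.take_one]
    cases arr with
    | nil => simp at h
    | cons a l => simp
  | succ k ih =>
    intro arr c s h
    have hk : k < arr.length := by omega
    have htk : arr.take (k+1) = arr.take k ++ [arr[k]] := by
      rw [List.take_add_one]; simp [List.getElem?_eq_getElem hk]
    have hgetD : arr.getD k 0 = arr[k] := by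
      simp [List.getD_eq_getElem?_getD, List.getElem?_eq_getElem hk]
    have hrev : (arr.take (k+1)).reverse = arr[k] :: (arr.take k).reverse := by
      rw [htk]; simp
    rw [pvWhileA, hgetD, hrev]
    by_cases hgt : arr[k] > key
    · simp only [hgt, if_pos]
      set arr2 := arr.set (k+1) arr[k] with harr2
      have hlen2 : k < arr2.length := by simp [harr2]; omega
      have htake2 : arr2.take k = arr.take k := by
        apply List.ext_getElem?
        intro i
        simp only [harr2, List.getElem?_take, List.getElem?_set]
        split_ifs <;> first | rfl | omega
      rw [ih arr2 (c+1) (s+1) hlen2, htake2]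
      have hlrev : ((arr.take k).reverse).length = k := by simp; omega
      have hsh : pvScanGT key (arr.take k).reverse ≤ k := by
        have := pvScanGT_le key (arr.take k).reverse
        omega
      set sh := pvScanGT key (arr.take k).reverse with hshdef
      simp only [pvScanGT, hgt, if_pos]
      have he2 : k - sh + sh = k := by omega
      refine Prod.ext ?_ (Prod.ext ?_ (Prod.ext ?_ ?_))
      · have := rot_step arr arr[k] k sh (k - sh) he2 (by omega) (List.getElem?_eq_getElem hk)
        simpa [harr2] using this
      · simp; omega
      · simp; ring
      · simp; ring
    · rw [if_neg hgt]
      simp [pvScanGT, hgt, List.take_append_drop]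

theorem set_head (arr : List Int) (cut : Nat) (h : cut < arr.length) (key : Int) :
    (arr.take (cut+1)).set cut key = arr.take cut ++ [key] := by
  have hmin : cut + 1 ≤ arr.length := h
  have h2 : cut ≤ arr.length := h.le
  apply List.ext_getElem?
  intro i
  simp only [List.getElem?_set, List.getElem?_take, List.getElem?_append, List.length_take,
    Nat.min_eq_left hmin, Nat.min_eq_left h2]
  split_ifs <;> first | rfl | omega | (congr 1; omega) | (simp; omega) | simp_all

-- one outer step of A's recursion is exactly one pvStepB
theorem stepAB (arr : List Int) (i c s : Int) (h0 : 0 ≤ i) (h1 : i.toNat < arr.length) :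
    ((pvWhileA (arr.getD i.toNat 0) arr i.toNat c s).1.set (pvWhileA (arr.getD i.toNat 0) arr i.toNat c s).2.1 (arr.getD i.toNat 0),
     (if 1 ≤ (pvWhileA (arr.getD i.toNat 0) arr i.toNat c s).2.1 then (pvWhileA (arr.getD i.toNat 0) arr i.toNat c s).2.2.1 + 1 else (pvWhileA (arr.getD i.toNat 0) arr i.toNat c s).2.2.1),
     (pvWhileA (arr.getD i.toNat 0) arr i.toNat c s).2.2.2)
    = pvStepB (arr, c, s) i := by
  simp only [pvStepB]
  rw [pvWhileA_eq _ _ arr c s h1]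
  have hshle : pvScanGT (arr.getD i.toNat 0) (arr.take i.toNat).reverse ≤ i.toNat := by
    have hlen : ((arr.take i.toNat).reverse).length = i.toNat := by simp; omega
    have h2 := pvScanGT_le (arr.getD i.toNat 0) (arr.take i.toNat).reverse
    omega
  set m := i.toNat with hm
  set key := arr.getD m 0
  set sh := pvScanGT key (arr.take m).reverse with hsh
  refine Prod.ext ?_ (Prod.ext ?_ ?_) <;> simp
  · rw [List.set_append]
    have hl : m - sh < (arr.take (m - sh + 1)).length := by simp; omega
    rw [if_pos (by simpa using hl)]
    rw [set_head arr (m - sh) (by omega) key]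
    simp
  · split_ifs <;> omega

theorem stepB_length (arr : List Int) (i c s : Int) (h1 : i.toNat < arr.length) :
    (pvStepB (arr, c, s) i).1.length = arr.length := by
  have hlen : ((arr.take i.toNat).reverse).length = i.toNat := by simp; omega
  have h2 := pvScanGT_le (arr.getD i.toNat 0) (arr.take i.toNat).reverse
  simp only [pvStepB, List.length_append, List.length_take, List.length_drop,
    List.length_cons, List.length_nil]
  omega

theorem recA_foldB (f : Nat) : ∀ (arr : List Int) (idx c s : Int), 0 ≤ idx →
    idx.toNat + f ≤ arr.length →
    pvRecA f arr idx c s =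
      (let r := (PySem.List.pyRange idx (idx + (f : Int)) 1).foldl pvStepB (arr, c, s); (r.2.1, r.2.2)) := by
  induction f with
  | zero =>
    intro arr idx c s h0 h1
    simp [pvRecA, PySem.List.pyRange_one_eq_nil (le_refl idx)]
  | succ f ih =>
    intro arr idx c s h0 h1
    rw [PySem.List.pyRange_one_cons (by push_cast; omega : idx < idx + ((f+1 : Nat) : Int))]
    simp only [List.foldl_cons]
    have hstep := stepAB arr idx c s h0 (by omega)
    simp only [pvRecA]
    have hX := congrArg (fun t => t.1) hstep
    have hC := congrArg (fun t => t.2.1) hstep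
    have hS := congrArg (fun t => t.2.2) hstep
    simp only at hX hC hS
    rw [hX, hC, hS]
    have hlen := stepB_length arr idx c s (by omega)
    have := ih (pvStepB (arr, c, s) idx).1 (idx + 1) (pvStepB (arr, c, s) idx).2.1 (pvStepB (arr, c, s) idx).2.2 (by omega) (by omega)
    simp only at this
    rw [this]
    have harg : idx + 1 + ((f : Nat) : Int) = idx + ((f + 1 : Nat) : Int) := by push_cast; ring
    rw [harg]

-- a step of A's recursion from a negative position changes nothing but the position
theorem pvRecA_step_neg (f : Nat) (arr : List Int) (idx c s : Int) (h : idx < 0) :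
    pvRecA (f+1) arr idx c s = pvRecA f arr (idx+1) c s := by
  simp only [pvRecA]
  have ht : idx.toNat = 0 := by omega
  rw [ht]
  simp only [pvWhileA]
  have hset : arr.set 0 (arr.getD 0 0) = arr := by
    cases arr <;> simp [List.getD]
  rw [if_neg (by omega : ¬ (1 ≤ (0:Nat)))]
  rw [hset]

-- A's recursion from a (possibly negative) start equals the recursion from max idx 0
theorem pvRecA_clamp (k : Nat) : ∀ (arr : List Int) (n idx c s : Int), idx = -(k : Int) → idx ≤ n →
    pvRecA (n - idx).toNat arr idx c s = pvRecA (n - max idx 0).toNat arr (max idx 0) c s := by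
  induction k with
  | zero =>
    intro arr n idx c s hk hle
    subst hk
    norm_num
  | succ k ih =>
    intro arr n idx c s hk hle
    have hneg : idx < 0 := by omega
    have hmax : max idx 0 = 0 := by omega
    by_cases hn : idx = n
    · have h1 : (n - idx).toNat = 0 := by omega
      have h2 : (n - max idx 0).toNat = 0 := by omega
      rw [hmax] at h2
      rw [h1, hmax, h2]
      simp [pvRecA]
    · have hfuel : (n - idx).toNat = (n - (idx + 1)).toNat + 1 := by omega
      rw [hfuel, pvRecA_step_neg _ arr idx c s hneg]
      have := ih arr n (idx + 1) c s (by omega) (by omega)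
      rw [this]
      have : max (idx + 1) 0 = 0 := by omega
      rw [this, hmax]

-- ===== VERDICT (by name: the statement is the Claim_ definition above) =====
theorem insertion_sort_recursive_spec : Claim_equal_insertion_sort_recursive := by
  intro arr n index comparisons swaps _ hpre
  unfold Spec_insertion_sort_recursive insertion_sort_recursive insertion_sort_recursive_alt
  rcases hpre with heq | ⟨h0, h1, h2⟩
  · subst heq
    have h1 : (index - index).toNat = 0 := by omega
    rw [h1, PySem.List.pyRange_one_eq_nil (le_max_left index 0)]
    rfl
  · have hclamp : pvRecA (n - index).toNat arr index comparisons swaps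
        = pvRecA (n - max index 0).toNat arr (max index 0) comparisons swaps := by
      by_cases hpos : 0 ≤ index
      · have : max index 0 = index := by omega
        rw [this]
      · exact pvRecA_clamp (-index).toNat arr n index comparisons swaps (by omega) h1
    rw [hclamp]
    by_cases hn : 0 ≤ n
    · have hm0 : 0 ≤ max index 0 := le_max_right index 0
      have hmn : max index 0 ≤ n := by omega
      have := recA_foldB (n - max index 0).toNat arr (max index 0) comparisons swaps hm0 (by omega)
      rw [this]
      have hend : max index 0 + (((n - max index 0).toNat : Nat) : Int) = n := by omega
      rw [hend]
    · have hmax : max index 0 = 0 := by omega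
      have hf : (n - max index 0).toNat = 0 := by omega
      rw [hf, hmax, PySem.List.pyRange_one_eq_nil (by omega : n ≤ 0)]
      rfl
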